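-- pv_equiv track=rewrite | github.com/usamireko/WFL-ASR | infer.py | align_phoneme_list
-- ===== SOURCE A (Python) =====
-- def align_phoneme_list(segments_pred, forced_list):
--     result = []
--     pred_idx = 0
--     forced_idx = 0
--     used_preds = set()
--
--     pred_map = [None] * len(forced_list)
--     for f_i, f_ph in enumerate(forced_list):
--         for p_i in range(pred_idx, len(segments_pred)):
--             _, _, p_ph = segments_pred[p_i]
--             if p_ph == f_ph and p_i not in used_preds:
--                 pred_map[f_i] = p_i
--                 used_preds.add(p_i)
--                 pred_idx = p_i + 1
--                 break
--     pred_ptr = 0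
--     for f_i, f_ph in enumerate(forced_list):
--         if pred_map[f_i] is None:
--             while pred_ptr < len(segments_pred) and pred_ptr in used_preds:
--                 pred_ptr += 1
--             if pred_ptr < len(segments_pred):
--                 pred_map[f_i] = pred_ptr
--                 used_preds.add(pred_ptr)
--                 pred_ptr += 1
--
--     for f_i, f_ph in enumerate(forced_list):
--         p_i = pred_map[f_i]
--         if p_i is not None and p_i < len(segments_pred):
--             s, e, _ = segments_pred[p_i]
--             result.append((s, e, f_ph))
--     return result
-- ===== SOURCE B (Python) =====
-- def align_phoneme_list(segments_pred, forced_list):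
--     # Bucket predicted indices by phoneme value once; pass 1 then finds the
--     # first index >= pred_idx for a value via a per-bucket monotone pointer
--     # (O(n+m) amortized instead of rescanning segments for every forced phoneme).
--     buckets = {}
--     for i, (_, _, ph) in enumerate(segments_pred):
--         buckets.setdefault(ph, []).append(i)
--
--     pred_map = [None] * len(forced_list)
--     used = set()
--     ptrs = {}
--     pred_idx = 0
--     for f_i, f_ph in enumerate(forced_list):
--         lst = buckets.get(f_ph)
--         if lst is None:
--             continue
--         k = ptrs.get(f_ph, 0)
--         while k < len(lst) and lst[k] < pred_idx:
--             k += 1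
--         if k < len(lst):
--             p = lst[k]
--             pred_map[f_i] = p
--             used.add(p)
--             pred_idx = p + 1
--             k += 1
--         ptrs[f_ph] = k
--
--     # pass 2 fused with output construction
--     result = []
--     n = len(segments_pred)
--     pred_ptr = 0
--     for f_i, f_ph in enumerate(forced_list):
--         p = pred_map[f_i]
--         if p is None:
--             while pred_ptr < n and pred_ptr in used:
--                 pred_ptr += 1
--             if pred_ptr < n:
--                 p = pred_ptr
--                 pred_ptr += 1
--         if p is not None:
--             s, e, _ = segments_pred[p]
--             result.append((s, e, f_ph))
--     return result
-- ===== Notes on version B (the rewrite author's own statement) =====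
-- stated objective: faster
-- what changed: A rescans segments_pred from pred_idx for every forced phoneme; B buckets predicted indices by phoneme value once and serves each query from a per-bucket monotone pointer, fusing the fill pass with output construction.
import Mathlib
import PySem

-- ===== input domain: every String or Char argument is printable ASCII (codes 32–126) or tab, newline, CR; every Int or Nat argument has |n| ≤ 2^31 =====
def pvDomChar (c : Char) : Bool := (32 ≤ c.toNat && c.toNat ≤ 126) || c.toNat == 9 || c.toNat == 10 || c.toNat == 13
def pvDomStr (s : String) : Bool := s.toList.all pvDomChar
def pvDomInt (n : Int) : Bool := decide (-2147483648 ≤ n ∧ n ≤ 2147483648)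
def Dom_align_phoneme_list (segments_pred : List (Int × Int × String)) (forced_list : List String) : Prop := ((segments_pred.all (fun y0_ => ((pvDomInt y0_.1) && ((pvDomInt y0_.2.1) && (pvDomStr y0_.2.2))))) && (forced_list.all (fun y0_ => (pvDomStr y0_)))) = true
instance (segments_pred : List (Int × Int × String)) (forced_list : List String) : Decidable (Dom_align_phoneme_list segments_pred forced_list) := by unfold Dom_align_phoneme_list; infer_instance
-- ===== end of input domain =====

-- B replaces A's quadratic rescan of segments_pred per forced phoneme by per-phoneme
-- index buckets consumed with monotone pointers (objective: faster; return value only,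
-- neither version mutates its arguments).

-- ===== PORT A =====
-- inner 'for p_i in range(pred_idx, len(segments_pred)): … break' of pass 1
def pvA_find (segs : List (Int × Int × String)) (v : String) (used : PySem.Set Nat) (i : Nat) : Option Nat :=
  if h : i < segs.length then
    if segs[i].2.2 == v && !(PySem.Set.contains used i) then some i
    else pvA_find segs v used (i + 1)
  else none
termination_by segs.length - i

-- pass 1: greedy value matching; returns (pred_map, used_preds)
def pvA_pass1 (segs : List (Int × Int × String)) :
    List String → Nat → PySem.Set Nat → List (Option Nat) × PySem.Set Nat
  | [], _, used => ([], used)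
  | f :: fs, predIdx, used =>
    match pvA_find segs f used predIdx with
    | some p =>
      let r := pvA_pass1 segs fs (p + 1) (PySem.Set.add used p)
      (some p :: r.1, r.2)
    | none =>
      let r := pvA_pass1 segs fs predIdx used
      (none :: r.1, r.2)

-- 'while pred_ptr < len(segments_pred) and pred_ptr in used_preds: pred_ptr += 1'
def pvA_skip (n : Nat) (used : PySem.Set Nat) (ptr : Nat) : Nat :=
  if h : ptr < n ∧ PySem.Set.contains used ptr = true then pvA_skip n used (ptr + 1)
  else ptr
termination_by n - ptr
decreasing_by omega

-- pass 2: fill unmatched entries with the first unused predicted indices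
def pvA_pass2 (n : Nat) : List (Option Nat) → PySem.Set Nat → Nat → List (Option Nat)
  | [], _, _ => []
  | some p :: pm, used, ptr => some p :: pvA_pass2 n pm used ptr
  | none :: pm, used, ptr =>
    let ptr' := pvA_skip n used ptr
    if ptr' < n then some ptr' :: pvA_pass2 n pm (PySem.Set.add used ptr') (ptr' + 1)
    else none :: pvA_pass2 n pm used ptr'

-- pass 3: build the result list
def pvA_pass3 (segs : List (Int × Int × String)) :
    List (Option Nat) → List String → List (Int × Int × String)
  | some p :: pm, f :: fs =>
    if h : p < segs.length then (segs[p].1, segs[p].2.1, f) :: pvA_pass3 segs pm fs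
    else pvA_pass3 segs pm fs
  | none :: pm, _ :: fs => pvA_pass3 segs pm fs
  | _, _ => []

def align_phoneme_list (segments_pred : List (Int × Int × String)) (forced_list : List String) : List (Int × Int × String) :=
  let r1 := pvA_pass1 segments_pred forced_list 0 PySem.Set.empty
  pvA_pass3 segments_pred (pvA_pass2 segments_pred.length r1.1 r1.2 0) forced_list

-- ===== PORT B =====
-- 'for i,(_,_,ph) in enumerate(segments_pred): buckets.setdefault(ph, []).append(i)'
-- (setdefault-then-append ported as getD/insert: same key order, same lists)
def pvB_buckets : List (Int × Int × String) → Nat → PySem.Dict String (List Nat) →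
    PySem.Dict String (List Nat)
  | [], _, d => d
  | x :: rest, i, d => pvB_buckets rest (i + 1) (d.insert x.2.2 (d.getD x.2.2 [] ++ [i]))

-- 'while k < len(lst) and lst[k] < pred_idx: k += 1'
def pvB_skipLt (lst : List Nat) (predIdx : Nat) (k : Nat) : Nat :=
  if h : k < lst.length then
    if lst[k] < predIdx then pvB_skipLt lst predIdx (k + 1) else k
  else k
termination_by lst.length - k

-- pass 1 of B: bucket lookup with per-bucket pointer; returns (pred_map, used)
def pvB_pass1 (bks : PySem.Dict String (List Nat)) :
    List String → Nat → PySem.Set Nat → PySem.Dict String Nat →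
    List (Option Nat) × PySem.Set Nat
  | [], _, used, _ => ([], used)
  | f :: fs, predIdx, used, ptrs =>
    match bks.get? f with
    | none =>
      let r := pvB_pass1 bks fs predIdx used ptrs
      (none :: r.1, r.2)
    | some lst =>
      let k := pvB_skipLt lst predIdx (ptrs.getD f 0)
      if h : k < lst.length then
        let p := lst[k]
        let r := pvB_pass1 bks fs (p + 1) (PySem.Set.add used p) (ptrs.insert f (k + 1))
        (some p :: r.1, r.2)
      else
        let r := pvB_pass1 bks fs predIdx used (ptrs.insert f k)
        (none :: r.1, r.2)

-- 'while pred_ptr < n and pred_ptr in used: pred_ptr += 1'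
def pvB_skipUsed (n : Nat) (used : PySem.Set Nat) (ptr : Nat) : Nat :=
  if h : ptr < n ∧ PySem.Set.contains used ptr = true then pvB_skipUsed n used (ptr + 1)
  else ptr
termination_by n - ptr
decreasing_by omega

-- fused pass 2 of B: fill unmatched entries and emit the result in one loop
def pvB_pass2 (segs : List (Int × Int × String)) (used : PySem.Set Nat) :
    List (Option Nat) → List String → Nat → List (Int × Int × String)
  | some p :: pm, f :: fs, ptr =>
    ((segs.getD p (0, 0, "")).1, (segs.getD p (0, 0, "")).2.1, f) :: pvB_pass2 segs used pm fs ptr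
  | none :: pm, f :: fs, ptr =>
    let ptr' := pvB_skipUsed segs.length used ptr
    if ptr' < segs.length then
      ((segs.getD ptr' (0, 0, "")).1, (segs.getD ptr' (0, 0, "")).2.1, f) ::
        pvB_pass2 segs used pm fs (ptr' + 1)
    else pvB_pass2 segs used pm fs ptr'
  | _, _, _ => []

def align_phoneme_list_alt (segments_pred : List (Int × Int × String)) (forced_list : List String) : List (Int × Int × String) :=
  let bks := pvB_buckets segments_pred 0 PySem.Dict.empty
  let r1 := pvB_pass1 bks forced_list 0 PySem.Set.empty PySem.Dict.empty
  pvB_pass2 segments_pred r1.2 r1.1 forced_list 0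

-- ===== PRECONDITION & SPEC =====
def Spec_align_phoneme_list (segments_pred : List (Int × Int × String)) (forced_list : List String) (out : List (Int × Int × String)) : Prop := out = align_phoneme_list_alt segments_pred forced_list
instance (segments_pred : List (Int × Int × String)) (forced_list : List String) (out : List (Int × Int × String)) : Decidable (Spec_align_phoneme_list segments_pred forced_list out) := by unfold Spec_align_phoneme_list; infer_instance

-- ===== CLAIM (what is proved, stated in full; the proofs are below) =====
def Claim_equal_align_phoneme_list : Prop := ∀ (segments_pred : List (Int × Int × String)) (forced_list : List String), Dom_align_phoneme_list segments_pred forced_list → Spec_align_phoneme_list segments_pred forced_list (align_phoneme_list segments_pred forced_list)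

-- ===== LEMMAS AND PROOFS =====

-- phoneme value at index j (what segments_pred[j][2] reads; (0,0,"") never used in range)
def pvPhv (segs : List (Int × Int × String)) (j : Nat) : String := (segs.getD j (0, 0, "")).2.2

-- the list of indices of segs (indexed from i) whose phoneme is v, in increasing order
def pvIdxList : List (Int × Int × String) → Nat → String → List Nat
  | [], _, _ => []
  | x :: l, i, v => if x.2.2 = v then i :: pvIdxList l (i + 1) v else pvIdxList l (i + 1) v

lemma mem_pvIdxList : ∀ (l : List (Int × Int × String)) (i : Nat) (v : String) (j : Nat),
    j ∈ pvIdxList l i v ↔ ∃ k, k < l.length ∧ j = i + k ∧ (l.getD k (0, 0, "")).2.2 = v := by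
  intro l
  induction l with
  | nil => simp [pvIdxList]
  | cons x l ih =>
    intro i v j
    simp only [pvIdxList]
    constructor
    · intro hj
      by_cases hx : x.2.2 = v
      · simp [hx] at hj
        rcases hj with h | h
        · exact ⟨0, by simp [h, hx]⟩
        · rcases (ih (i + 1) v j).mp h with ⟨k, hk, hjk, hv⟩
          exact ⟨k + 1, by simpa using hk, by omega, by simpa using hv⟩
      · simp [hx] at hj
        rcases (ih (i + 1) v j).mp hj with ⟨k, hk, hjk, hv⟩
        exact ⟨k + 1, by simpa using hk, by omega, by simpa using hv⟩
    · rintro ⟨k, hk, hjk, hv⟩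
      cases k with
      | zero =>
        simp at hv hjk
        simp [hv, hjk]
      | succ k =>
        have hmem : j ∈ pvIdxList l (i + 1) v :=
          (ih (i + 1) v j).mpr ⟨k, by simpa using hk, by omega, by simpa using hv⟩
        by_cases hx : x.2.2 = v <;> simp [hx, hmem]

lemma pvIdxList_lb : ∀ (l : List (Int × Int × String)) (i : Nat) (v : String),
    ∀ j ∈ pvIdxList l i v, i ≤ j := by
  intro l i v j hj
  rcases (mem_pvIdxList l i v j).mp hj with ⟨k, _, hjk, _⟩
  omega

lemma pvIdxList_ub : ∀ (l : List (Int × Int × String)) (i : Nat) (v : String),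
    ∀ j ∈ pvIdxList l i v, j < i + l.length := by
  intro l i v j hj
  rcases (mem_pvIdxList l i v j).mp hj with ⟨k, hk, hjk, _⟩
  omega

lemma pvIdxList_pairwise : ∀ (l : List (Int × Int × String)) (i : Nat) (v : String),
    (pvIdxList l i v).Pairwise (· < ·) := by
  intro l
  induction l with
  | nil => intro i v; simp [pvIdxList]
  | cons x l ih =>
    intro i v
    by_cases hx : x.2.2 = v <;> simp [pvIdxList, hx]
    · exact ⟨fun j hj => lt_of_lt_of_le (by omega) (pvIdxList_lb l (i + 1) v j hj), ih (i + 1) v⟩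
    · exact ih (i + 1) v

lemma pvB_buckets_getD : ∀ (l : List (Int × Int × String)) (i : Nat)
    (d : PySem.Dict String (List Nat)) (v : String),
    (pvB_buckets l i d).getD v [] = d.getD v [] ++ pvIdxList l i v := by
  intro l
  induction l with
  | nil => intro i d v; simp [pvB_buckets, pvIdxList]
  | cons x l ih =>
    intro i d v
    simp only [pvB_buckets, pvIdxList]
    rw [ih]
    by_cases hv : v = x.2.2
    · subst hv
      rw [PySem.Dict.getD_insert_self]
      simp
    · rw [PySem.Dict.getD_insert_of_ne _ _ _ hv]
      rw [if_neg (fun h : x.2.2 = v => hv h.symm)]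

-- find?-helpers on sorted index lists
lemma find?_ge_of_sorted_mem (l : List Nat) (i : Nat) (hs : l.Pairwise (· < ·)) (hi : i ∈ l) :
    l.find? (fun j => decide (i ≤ j)) = some i := by
  induction l with
  | nil => simp at hi
  | cons a l ih =>
    rcases List.mem_cons.mp hi with h | h
    · subst h; rw [List.find?_cons_of_pos (by simp)]
    · have ha : a < i := (List.pairwise_cons.mp hs).1 i h
      rw [List.find?_cons_of_neg (by simp; omega)]
      exact ih (List.pairwise_cons.mp hs).2 h

lemma find?_ge_succ_of_not_mem (l : List Nat) (i : Nat) (hi : i ∉ l) :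
    l.find? (fun j => decide (i ≤ j)) = l.find? (fun j => decide (i + 1 ≤ j)) := by
  induction l with
  | nil => simp
  | cons a l ih =>
    have hai : a ≠ i := fun h => hi (by simp [h])
    by_cases h : i ≤ a
    · have h' : i + 1 ≤ a := by omega
      rw [List.find?_cons_of_pos (by simpa using h), List.find?_cons_of_pos (by simpa using h')]
    · have h' : ¬ (i + 1 ≤ a) := by omega
      rw [List.find?_cons_of_neg (by simpa using h), List.find?_cons_of_neg (by simpa using h')]
      exact ih (fun hm => hi (List.mem_cons_of_mem _ hm))

-- A's inner scan computes the first v-index ≥ i, provided used ⊆ [0, i)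
lemma pvA_find_eq (segs : List (Int × Int × String)) (v : String) :
    ∀ (i : Nat) (used : PySem.Set Nat), (∀ u ∈ used, u < i) →
    pvA_find segs v used i = (pvIdxList segs 0 v).find? (fun j => decide (i ≤ j)) := by
  have base : ∀ (i : Nat), segs.length ≤ i →
      (pvIdxList segs 0 v).find? (fun j => decide (i ≤ j)) = none := by
    intro i hi
    rw [List.find?_eq_none]
    intro j hj
    have := pvIdxList_ub segs 0 v j hj
    simp only [decide_eq_true_eq]
    omega
  intro i used hu
  fun_induction pvA_find segs v used i with
  | case1 i hi hc =>
    -- matched: segs[i].2.2 == v and i not used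
    have hv : segs[i].2.2 = v := by
      by_contra hne
      rw [show (segs[i].2.2 == v) = false from beq_eq_false_iff_ne.mpr hne] at hc
      simp at hc
    have hmem : i ∈ pvIdxList segs 0 v := by
      refine (mem_pvIdxList segs 0 v i).mpr ⟨i, hi, by omega, ?_⟩
      rw [List.getD_eq_getElem _ _ hi]; exact hv
    exact (find?_ge_of_sorted_mem _ i (pvIdxList_pairwise segs 0 v) hmem).symm
  | case2 i hi hc ih =>
    -- no match at i: either value differs or i ∈ used (impossible)
    have hv : segs[i].2.2 ≠ v := by
      intro hv
      apply hc
      simp [hv]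
      intro hm
      exact absurd (hu i hm) (lt_irrefl i)
    have hnot : i ∉ pvIdxList segs 0 v := by
      intro hm
      rcases (mem_pvIdxList segs 0 v i).mp hm with ⟨k, hk, hik, hkv⟩
      have : k = i := by omega
      subst this
      rw [List.getD_eq_getElem _ _ hk] at hkv
      exact hv hkv
    rw [ih (fun u hm => Nat.lt_succ_of_lt (hu u hm)), ← find?_ge_succ_of_not_mem _ i hnot]
  | case3 i hi =>
    exact (base i (by omega)).symm

lemma pvA_find_lt (segs : List (Int × Int × String)) (v : String) :
    ∀ (i : Nat) (used : PySem.Set Nat) (p : Nat),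
    pvA_find segs v used i = some p → p < segs.length := by
  intro i used p
  fun_induction pvA_find segs v used i with
  | case1 i hi hc => intro h; cases h; exact hi
  | case2 i hi hc ih => exact ih
  | case3 i hi => intro h; cases h

-- B's pointer skip finds the same element
lemma pvB_skipLt_getElem? (lst : List Nat) (i : Nat) :
    ∀ (k0 : Nat), (∀ j ∈ lst.take k0, j < i) →
    lst[pvB_skipLt lst i k0]? = lst.find? (fun j => decide (i ≤ j)) := by
  intro k0 hk0
  fun_induction pvB_skipLt lst i k0 with
  | case1 k0 hlt hval ih =>
    refine ih ?_
    intro j hj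
    rw [List.take_add_one] at hj
    rcases List.mem_append.mp hj with h | h
    · exact hk0 j h
    · rw [List.getElem?_eq_getElem hlt] at h
      simp only [Option.toList_some, List.mem_singleton] at h
      subst h
      exact hval
  | case2 k0 hlt hval =>
    rw [List.getElem?_eq_getElem hlt]
    conv_rhs => rw [← List.take_append_drop k0 lst]
    rw [List.find?_append]
    have h1 : (lst.take k0).find? (fun j => decide (i ≤ j)) = none := by
      rw [List.find?_eq_none]
      intro j hj
      simp only [decide_eq_true_eq]
      exact Nat.not_le.mpr (hk0 j hj)
    rw [h1, List.drop_eq_getElem_cons hlt, List.find?_cons_of_pos (by simp; omega)]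
    rfl
  | case3 k0 hge =>
    rw [List.getElem?_eq_none (by omega)]
    rw [Eq.comm, List.find?_eq_none]
    intro j hj
    simp only [decide_eq_true_eq]
    exact Nat.not_le.mpr (hk0 j (by rwa [List.take_of_length_le (by omega)]))

lemma pvB_skipLt_take (lst : List Nat) (i : Nat) :
    ∀ (k0 : Nat), (∀ j ∈ lst.take k0, j < i) →
    ∀ j ∈ lst.take (pvB_skipLt lst i k0), j < i := by
  intro k0 hk0
  fun_induction pvB_skipLt lst i k0 with
  | case1 k0 hlt hval ih =>
    refine ih ?_
    intro j hj
    rw [List.take_add_one] at hj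
    rcases List.mem_append.mp hj with h | h
    · exact hk0 j h
    · rw [List.getElem?_eq_getElem hlt] at h
      simp only [Option.toList_some, List.mem_singleton] at h
      subst h
      exact hval
  | case2 k0 hlt hval => exact hk0
  | case3 k0 hge => exact hk0

lemma take_succ_le_getElem (lst : List Nat) (hs : lst.Pairwise (· < ·)) (k : Nat)
    (hk : k < lst.length) : ∀ j ∈ lst.take (k + 1), j ≤ lst[k] := by
  intro j hj
  rcases List.mem_take_iff_getElem.mp hj with ⟨m, hm, rfl⟩
  have hmk : m ≤ k := by omega
  have hml : m < lst.length := by omega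
  rcases Nat.eq_or_lt_of_le hmk with h | h
  · subst h; simp
  · exact le_of_lt ((List.pairwise_iff_getElem.mp hs) m k hml hk h)

-- main pass-1 equivalence
lemma pass1_eq (segs : List (Int × Int × String)) :
    ∀ (fs : List String) (predIdx : Nat) (used : PySem.Set Nat) (ptrs : PySem.Dict String Nat),
    (∀ u ∈ used, u < predIdx) →
    (∀ v : String, ∀ j ∈ ((pvB_buckets segs 0 PySem.Dict.empty).getD v []).take (ptrs.getD v 0),
      j < predIdx) →
    pvA_pass1 segs fs predIdx used =
      pvB_pass1 (pvB_buckets segs 0 PySem.Dict.empty) fs predIdx used ptrs := by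
  intro fs
  induction fs with
  | nil => intro predIdx used ptrs _ _; rfl
  | cons f fs ih =>
    intro predIdx used ptrs h1 h2
    have hbk : (pvB_buckets segs 0 PySem.Dict.empty).getD f [] = pvIdxList segs 0 f := by
      rw [pvB_buckets_getD, PySem.Dict.getD_empty]
      rfl
    have hfind := pvA_find_eq segs f predIdx used h1
    simp only [pvA_pass1, pvB_pass1]
    cases hg : (pvB_buckets segs 0 PySem.Dict.empty).get? f with
    | none =>
      have hnil : pvIdxList segs 0 f = [] := by
        rw [← hbk]
        exact PySem.Dict.getD_of_get?_eq_none _ _ hg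
      rw [hfind, hnil]
      simp only [List.find?_nil]
      rw [ih predIdx used ptrs h1 h2]
    | some lst =>
      have hlst : lst = pvIdxList segs 0 f := by
        rw [← hbk]
        exact (PySem.Dict.getD_of_get?_eq_some _ _ hg).symm
      have htake0 : ∀ j ∈ lst.take (ptrs.getD f 0), j < predIdx := by
        intro j hj
        refine h2 f j ?_
        rwa [hbk, ← hlst]
      have hsk := pvB_skipLt_getElem? lst predIdx (ptrs.getD f 0) htake0
      by_cases hk : pvB_skipLt lst predIdx (ptrs.getD f 0) < lst.length
      · have hfind_some :
            lst.find? (fun j => decide (predIdx ≤ j)) = some lst[pvB_skipLt lst predIdx (ptrs.getD f 0)] := by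
          rw [← hsk, List.getElem?_eq_getElem hk]
        have hfs : pvA_find segs f used predIdx = some lst[pvB_skipLt lst predIdx (ptrs.getD f 0)] := by
          rw [hfind, ← hlst, hfind_some]
        have hple : predIdx ≤ lst[pvB_skipLt lst predIdx (ptrs.getD f 0)] := by
          simpa using List.find?_some hfind_some
        rw [hfs]
        dsimp only
        rw [dif_pos hk]
        have h1' : ∀ u ∈ PySem.Set.add used lst[pvB_skipLt lst predIdx (ptrs.getD f 0)],
            u < lst[pvB_skipLt lst predIdx (ptrs.getD f 0)] + 1 := by
          intro u hu
          rcases (PySem.Set.mem_add used _ u).mp hu with h | h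
          · have := h1 u h; omega
          · omega
        have h2' : ∀ (v : String), ∀ j ∈ ((pvB_buckets segs 0 PySem.Dict.empty).getD v []).take
            ((ptrs.insert f (pvB_skipLt lst predIdx (ptrs.getD f 0) + 1)).getD v 0),
            j < lst[pvB_skipLt lst predIdx (ptrs.getD f 0)] + 1 := by
          intro v j hj
          by_cases hv : v = f
          · subst hv
            rw [PySem.Dict.getD_insert_self, hbk, ← hlst] at hj
            have hsorted : lst.Pairwise (· < ·) := by
              rw [hlst]; exact pvIdxList_pairwise segs 0 _
            have := take_succ_le_getElem lst hsorted _ hk j hj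
            omega
          · rw [PySem.Dict.getD_insert_of_ne _ _ _ hv] at hj
            have := h2 v j hj
            omega
        rw [ih _ _ _ h1' h2']
      · have hA : pvA_find segs f used predIdx = none := by
          rw [hfind, ← hlst, ← hsk, List.getElem?_eq_none (by omega)]
        rw [hA]
        dsimp only
        rw [dif_neg hk]
        have h2' : ∀ (v : String), ∀ j ∈ ((pvB_buckets segs 0 PySem.Dict.empty).getD v []).take
            ((ptrs.insert f (pvB_skipLt lst predIdx (ptrs.getD f 0))).getD v 0), j < predIdx := by
          intro v j hj
          by_cases hv : v = f
          · subst hv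
            rw [PySem.Dict.getD_insert_self, hbk, ← hlst] at hj
            exact pvB_skipLt_take lst predIdx _ htake0 j hj
          · rw [PySem.Dict.getD_insert_of_ne _ _ _ hv] at hj
            exact h2 v j hj
        rw [ih _ _ _ h1 h2']

lemma pass1_lt (segs : List (Int × Int × String)) :
    ∀ (fs : List String) (predIdx : Nat) (used : PySem.Set Nat) (p : Nat),
    some p ∈ (pvA_pass1 segs fs predIdx used).1 → p < segs.length := by
  intro fs
  induction fs with
  | nil => intro predIdx used p hp; simp [pvA_pass1] at hp
  | cons f fs ih =>
    intro predIdx used p hp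
    simp only [pvA_pass1] at hp
    cases hf : pvA_find segs f used predIdx with
    | some q =>
      rw [hf] at hp
      simp only [List.mem_cons] at hp
      rcases hp with h | h
      · injection h with h
        subst h
        exact pvA_find_lt segs f predIdx used p hf
      · exact ih _ _ p h
    | none =>
      rw [hf] at hp
      simp only [List.mem_cons] at hp
      rcases hp with h | h
      · cases h
      · exact ih _ _ p h

lemma pvA_skip_ge (n : Nat) (used : PySem.Set Nat) : ∀ ptr, ptr ≤ pvA_skip n used ptr := by
  intro ptr
  fun_induction pvA_skip n used ptr with
  | case1 ptr h ih => omega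
  | case2 ptr h => exact Nat.le_refl ptr

lemma skip_eq (n : Nat) : ∀ (ptr : Nat) (uA uB : PySem.Set Nat),
    (∀ j, ptr ≤ j → (j ∈ uA ↔ j ∈ uB)) → pvA_skip n uA ptr = pvB_skipUsed n uB ptr := by
  intro ptr uA uB
  fun_induction pvA_skip n uA ptr with
  | case1 ptr h1 ih =>
    intro h
    have hcB : PySem.Set.contains uB ptr = true := by
      rw [PySem.Set.contains_iff]
      exact (h ptr (Nat.le_refl ptr)).mp ((PySem.Set.contains_iff uA ptr).mp h1.2)
    rw [pvB_skipUsed.eq_def, dif_pos ⟨h1.1, hcB⟩]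
    exact ih (fun j hj => h j (by omega))
  | case2 ptr h1 =>
    intro h
    rw [pvB_skipUsed.eq_def, dif_neg ?_]
    rintro ⟨hn, hcB⟩
    exact h1 ⟨hn, (PySem.Set.contains_iff uA ptr).mpr
      ((h ptr (Nat.le_refl ptr)).mpr ((PySem.Set.contains_iff uB ptr).mp hcB))⟩

lemma pass23_eq (segs : List (Int × Int × String)) :
    ∀ (pm : List (Option Nat)) (fs : List String) (uA uB : PySem.Set Nat) (ptr : Nat),
    (∀ p : Nat, some p ∈ pm → p < segs.length) →
    (∀ j, ptr ≤ j → (j ∈ uA ↔ j ∈ uB)) →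
    pvA_pass3 segs (pvA_pass2 segs.length pm uA ptr) fs = pvB_pass2 segs uB pm fs ptr := by
  intro pm
  induction pm with
  | nil =>
    intro fs uA uB ptr _ _
    cases fs <;> rfl
  | cons o pm ih =>
    intro fs uA uB ptr hb hagree
    cases o with
    | some p =>
      cases fs with
      | nil => rfl
      | cons f fs =>
        have hp : p < segs.length := hb p (by simp)
        simp only [pvA_pass2, pvA_pass3, pvB_pass2]
        rw [dif_pos hp, List.getD_eq_getElem _ _ hp]
        rw [ih fs uA uB ptr (fun q hq => hb q (List.mem_cons_of_mem _ hq)) hagree]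
    | none =>
      cases fs with
      | nil =>
        simp only [pvA_pass2]
        split <;> rfl
      | cons f fs =>
        have hse := skip_eq segs.length ptr uA uB hagree
        have hge := pvA_skip_ge segs.length uA ptr
        simp only [pvA_pass2, pvB_pass2]
        rw [← hse]
        by_cases hlt : pvA_skip segs.length uA ptr < segs.length
        · rw [if_pos hlt, if_pos hlt]
          simp only [pvA_pass3]
          rw [dif_pos hlt, List.getD_eq_getElem _ _ hlt]
          have hagree' : ∀ j, pvA_skip segs.length uA ptr + 1 ≤ j →
              (j ∈ PySem.Set.add uA (pvA_skip segs.length uA ptr) ↔ j ∈ uB) := by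
            intro j hj
            rw [PySem.Set.mem_add]
            constructor
            · rintro (h | h)
              · exact (hagree j (by omega)).mp h
              · omega
            · intro h
              exact Or.inl ((hagree j (by omega)).mpr h)
          rw [ih fs _ uB _ (fun q hq => hb q (List.mem_cons_of_mem _ hq)) hagree']
        · rw [if_neg hlt, if_neg hlt]
          simp only [pvA_pass3]
          rw [ih fs uA uB _ (fun q hq => hb q (List.mem_cons_of_mem _ hq))
            (fun j hj => hagree j (by omega))]

-- ===== VERDICT (by name: the statement is the Claim_ definition above) =====
theorem align_phoneme_list_spec : Claim_equal_align_phoneme_list := by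
  intro segs fs _
  unfold Spec_align_phoneme_list align_phoneme_list align_phoneme_list_alt
  simp only []
  rw [← pass1_eq segs fs 0 PySem.Set.empty PySem.Dict.empty (by simp [PySem.Set.empty])
    (by intro v j hj; simp [PySem.Dict.getD_empty] at hj)]
  exact pass23_eq segs _ fs _ _ 0 (fun p hp => pass1_lt segs fs 0 _ p hp) (fun j _ => Iff.rfl)
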